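-- pv_equiv track=rewrite | github.com/sohamm3/Sorting-Algorithm-Visualizer | Sorting_algo.py | color_array_merge
-- ===== SOURCE A (Python) =====
-- def color_array_merge(n,left,middle,right):
--     color_array=[]
--     for i in range(n):
--         if  i>=left and i<=right:
--             if i<=middle:
--                 color_array.append("#EEE8AA")
--             else:
--                 color_array.append("red")
--         else:
--             color_array.append("white")
--     return color_array
-- ===== SOURCE B (Python) =====
-- def color_array_merge(n, left, middle, right):
--     m = max(n, 0)
--     color_array = ["white"] * m
--     for i in range(max(left, 0), min(middle, right, m - 1) + 1):
--         color_array[i] = "#EEE8AA"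
--     for i in range(max(left, middle + 1, 0), min(right, m - 1) + 1):
--         color_array[i] = "red"
--     return color_array
-- ===== Notes on version B (the rewrite author's own statement) =====
-- stated objective: faster
-- what changed: Instead of one scan over all n indices with a nested per-element conditional, B allocates the all-white array in one bulk operation and paints only the two clamped contiguous segments (yellow up to middle, red after it), so the interpreted loop runs over the merge window only.
import Mathlib
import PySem

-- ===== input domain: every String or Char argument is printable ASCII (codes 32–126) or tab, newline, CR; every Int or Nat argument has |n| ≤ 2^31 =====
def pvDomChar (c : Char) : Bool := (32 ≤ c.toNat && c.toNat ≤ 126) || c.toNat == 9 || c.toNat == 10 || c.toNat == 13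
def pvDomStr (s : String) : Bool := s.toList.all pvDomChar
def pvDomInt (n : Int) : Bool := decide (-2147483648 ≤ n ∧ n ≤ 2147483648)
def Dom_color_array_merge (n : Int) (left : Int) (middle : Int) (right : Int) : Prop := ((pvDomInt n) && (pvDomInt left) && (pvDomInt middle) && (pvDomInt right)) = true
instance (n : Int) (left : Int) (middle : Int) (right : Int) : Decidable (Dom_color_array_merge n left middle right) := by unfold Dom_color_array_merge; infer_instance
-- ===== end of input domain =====

-- B builds the all-white array in one bulk allocation and paints only the two clamped
-- contiguous segments (yellow then red) instead of A's per-index conditional scan.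


-- ===== PORT A =====
def color_array_merge (n : Int) (left : Int) (middle : Int) (right : Int) : List String :=
  (PySem.List.pyRange 0 n 1).foldl
    (fun color_array i =>
      if left ≤ i ∧ i ≤ right then
        if i ≤ middle then color_array ++ ["#EEE8AA"]
        else color_array ++ ["red"]
      else color_array ++ ["white"])
    []

-- ===== PORT B =====
-- both loop ranges start at a value ≥ 0, so '.toNat' on the loop index is exact
def color_array_merge_alt (n : Int) (left : Int) (middle : Int) (right : Int) : List String :=
  let m := max n 0
  let ca := List.replicate m.toNat "white"
  let ca := (PySem.List.pyRange (max left 0) (min middle (min right (m - 1)) + 1) 1).foldl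
      (fun a i => a.set i.toNat "#EEE8AA") ca
  (PySem.List.pyRange (max left (max (middle + 1) 0)) (min right (m - 1) + 1) 1).foldl
      (fun a i => a.set i.toNat "red") ca

-- ===== PRECONDITION & SPEC =====
def Spec_color_array_merge (n : Int) (left : Int) (middle : Int) (right : Int) (out : List String) : Prop := out = color_array_merge_alt n left middle right
instance (n : Int) (left : Int) (middle : Int) (right : Int) (out : List String) : Decidable (Spec_color_array_merge n left middle right out) := by unfold Spec_color_array_merge; infer_instance

-- ===== CLAIM (what is proved, stated in full; the proofs are below) =====
def Claim_equal_color_array_merge : Prop := ∀ (n : Int) (left : Int) (middle : Int) (right : Int), Dom_color_array_merge n left middle right → Spec_color_array_merge n left middle right (color_array_merge n left middle right)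

-- ===== LEMMAS AND PROOFS =====

-- A's append-fold is a map
theorem foldl_append_map (g : Int → String) (xs : List Int) (acc : List String) :
    xs.foldl (fun a i => a ++ [g i]) acc = acc ++ xs.map g := by
  induction xs generalizing acc with
  | nil => simp
  | cons x t ih => simp [List.foldl, ih]

theorem A_eq_map (n left middle right : Int) :
    color_array_merge n left middle right =
      (PySem.List.pyRange 0 n 1).map (fun i =>
        if left ≤ i ∧ i ≤ right then
          (if i ≤ middle then "#EEE8AA" else "red")
        else "white") := by
  unfold color_array_merge
  have h : ∀ (a : List String) (i : Int),
      (if left ≤ i ∧ i ≤ right then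
        if i ≤ middle then a ++ ["#EEE8AA"] else a ++ ["red"]
       else a ++ ["white"]) =
      a ++ [if left ≤ i ∧ i ≤ right then
              (if i ≤ middle then "#EEE8AA" else "red") else "white"] := by
    intro a i; split_ifs <;> rfl
  simp only [h]
  rw [foldl_append_map]
  simp

-- the set-fold over a list of nonnegative indices, element-wise
theorem getElem?_foldl_set (L : List Int) (hL : ∀ i ∈ L, 0 ≤ i) (v : String)
    (xs : List String) (j : Nat) :
    (L.foldl (fun a i => a.set i.toNat v) xs)[j]? =
      if (j : Int) ∈ L ∧ j < xs.length then some v else xs[j]? := by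
  induction L generalizing xs with
  | nil => simp
  | cons x t ih =>
    have hx : 0 ≤ x := hL x (by simp)
    have ht : ∀ i ∈ t, 0 ≤ i := fun i hi => hL i (by simp [hi])
    simp only [List.foldl]
    rw [ih ht, List.length_set, List.getElem?_set]
    have hxe : (x.toNat = j) = (x = (j : Int)) := by
      apply propext; omega
    simp only [List.mem_cons, hxe]
    split_ifs <;> first | rfl | omega | simp_all

theorem length_foldl_set (L : List Int) (v : String) (xs : List String) :
    (L.foldl (fun a i => a.set i.toNat v) xs).length = xs.length := by
  induction L generalizing xs with
  | nil => rfl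
  | cons x t ih => simp [List.foldl, ih, List.length_set]

theorem color_array_merge_spec_aux (n left middle right : Int) :
    color_array_merge n left middle right = color_array_merge_alt n left middle right := by
  rw [A_eq_map]
  unfold color_array_merge_alt
  have hy : ∀ i ∈ PySem.List.pyRange (max left 0) (min middle (min right (max n 0 - 1)) + 1) 1, 0 ≤ i := by
    intro i hi
    have := (PySem.List.mem_pyRange_one).mp hi
    omega
  have hr : ∀ i ∈ PySem.List.pyRange (max left (max (middle + 1) 0)) (min right (max n 0 - 1) + 1) 1, 0 ≤ i := by
    intro i hi
    have := (PySem.List.mem_pyRange_one).mp hi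
    omega
  have hm : (max n 0).toNat = n.toNat := by omega
  apply List.ext_getElem?
  intro j
  rw [getElem?_foldl_set _ hr, getElem?_foldl_set _ hy]
  simp only [length_foldl_set, List.length_replicate, List.getElem?_map,
    PySem.List.getElem?_pyRange_one, List.getElem?_replicate, PySem.List.mem_pyRange_one, hm]
  by_cases hj : j < n.toNat
  · have hj' : (j : Int) < n := by omega
    have hjr : j < (n - 0).toNat := by omega
    simp only [if_pos hjr, if_pos hj, Option.map_some, zero_add]
    by_cases h1 : left ≤ (j : Int) ∧ (j : Int) ≤ right
    · by_cases h2 : (j : Int) ≤ middle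
      · have hYmem : max left 0 ≤ (j : Int) ∧ (j : Int) < min middle (min right (max n 0 - 1)) + 1 := by omega
        have hRnot : ¬ (max left (max (middle + 1) 0) ≤ (j : Int) ∧ (j : Int) < min right (max n 0 - 1) + 1) := by omega
        simp [h1, h2, hYmem, hj]
      · have hRmem : max left (max (middle + 1) 0) ≤ (j : Int) ∧ (j : Int) < min right (max n 0 - 1) + 1 := by omega
        simp [h1, h2, hRmem, hj]
    · simp only [hj, and_true]
      split_ifs <;> first | rfl | omega
  · have hYnot : ¬ ((max left 0 ≤ (j : Int) ∧ (j : Int) < min middle (min right (max n 0 - 1)) + 1) ∧ j < n.toNat) := by omega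
    have hRnot : ¬ ((max left (max (middle + 1) 0) ≤ (j : Int) ∧ (j : Int) < min right (max n 0 - 1) + 1) ∧ j < n.toNat) := by omega
    have hjr : ¬ j < (n - 0).toNat := by omega
    simp [hj]

-- ===== VERDICT (by name: the statement is the Claim_ definition above) =====
theorem color_array_merge_spec : Claim_equal_color_array_merge := by
  intro n left middle right _
  exact color_array_merge_spec_aux n left middle right
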